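-- pv_equiv track=rewrite | github.com/Pa7rickStar/docker-jdownloader2 | scripts/get-jre.py | pick_asset
-- ===== SOURCE A (Python) =====
-- def pick_asset(release_json: dict):
--     """Prefer linux x64 JRE, then JDK; avoid alpine/debug/static/symbols; tar/zip."""
--     assets = release_json.get("assets") or []
--     def ok(a, kind):
--         n = (a.get("name") or "").lower()
--         if "linux" not in n: return False
--         if "alpine" in n: return False
--         if not ("x64" in n or "x86_64" in n): return False
--         if kind not in n: return False
--         if not (n.endswith(".tar.gz") or n.endswith(".tgz") or n.endswith(".tar") or n.endswith(".zip")):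
--             return False
--         for bad in ("debugimage","testimage","static","symbols"):
--             if bad in n: return False
--         return True
--     for kind in ("jre", "jdk"):
--         for a in assets:
--             if ok(a, kind):
--                 return a["name"], a["browser_download_url"]
--     return "", ""
-- ===== SOURCE B (Python) =====
-- def pick_asset(release_json: dict):
--     """Prefer linux x64 JRE, then JDK; avoid alpine/debug/static/symbols; tar/zip."""
--     assets = release_json.get("assets") or []
--     def ok(a, kind):
--         n = (a.get("name") or "").lower()
--         if "linux" not in n: return False
--         if "alpine" in n: return False
--         if not ("x64" in n or "x86_64" in n): return False
--         if kind not in n: return False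
--         if not (n.endswith(".tar.gz") or n.endswith(".tgz") or n.endswith(".tar") or n.endswith(".zip")):
--             return False
--         for bad in ("debugimage","testimage","static","symbols"):
--             if bad in n: return False
--         return True
--     first_jre = None
--     first_jdk = None
--     for a in assets:
--         if ok(a, "jre") and first_jre is None:
--             first_jre = a
--         elif ok(a, "jdk") and first_jdk is None:
--             first_jdk = a
--     chosen = first_jre if first_jre is not None else first_jdk
--     if chosen is None:
--         return "", ""
--     return chosen["name"], chosen["browser_download_url"]
-- ===== Notes on version B (the rewrite author's own statement) =====
-- stated objective: simpler
-- what changed: A makes two passes over assets (a full jre scan, then a full jdk scan); B scans assets exactly once, recording the first jre-matching and first jdk-matching asset in two slots and preferring the jre slot at the end.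
import Mathlib
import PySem

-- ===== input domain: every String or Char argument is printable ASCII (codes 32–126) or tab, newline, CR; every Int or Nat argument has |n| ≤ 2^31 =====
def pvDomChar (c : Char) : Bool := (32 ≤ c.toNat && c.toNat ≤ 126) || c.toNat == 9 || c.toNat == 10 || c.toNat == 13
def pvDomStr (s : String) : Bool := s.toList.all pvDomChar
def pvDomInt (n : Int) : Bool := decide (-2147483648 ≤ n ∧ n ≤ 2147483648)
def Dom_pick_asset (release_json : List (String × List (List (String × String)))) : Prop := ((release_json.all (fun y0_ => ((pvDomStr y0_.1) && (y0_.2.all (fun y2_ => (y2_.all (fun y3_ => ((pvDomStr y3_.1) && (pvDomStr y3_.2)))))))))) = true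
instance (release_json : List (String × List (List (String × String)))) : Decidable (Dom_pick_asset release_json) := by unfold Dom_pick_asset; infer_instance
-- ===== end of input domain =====

-- B replaces A's two passes (jre scan, then jdk scan) by a single scan keeping the first
-- jre and first jdk candidates; objective: simpler/one-pass, same return value.

-- shared helper: the 'ok' predicate (identical in A and B)
def okPred (a : List (String × String)) (kind : String) : Bool :=
  let n := PySem.Str.lower (((PySem.Dict.mk a).get? "name").getD "")
  if !(PySem.Str.isIn "linux" n) then false
  else if PySem.Str.isIn "alpine" n then false
  else if !(PySem.Str.isIn "x64" n || PySem.Str.isIn "x86_64" n) then false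
  else if !(PySem.Str.isIn kind n) then false
  else if !(PySem.Str.endswith n ".tar.gz" || PySem.Str.endswith n ".tgz" ||
            PySem.Str.endswith n ".tar" || PySem.Str.endswith n ".zip") then false
  else if PySem.Str.isIn "debugimage" n || PySem.Str.isIn "testimage" n ||
          PySem.Str.isIn "static" n || PySem.Str.isIn "symbols" n then false
  else true

-- a["name"], a["browser_download_url"]; getD "" is exact under Pre_: any asset with
-- okPred true has a non-empty "name", and Pre_ guarantees the SELECTED asset carries
-- "browser_download_url" (Python raises KeyError exactly where it is absent)
def pvExtract (a : List (String × String)) : String × String :=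
  (((PySem.Dict.mk a).get? "name").getD "", ((PySem.Dict.mk a).get? "browser_download_url").getD "")

-- ===== PORT A =====
-- inner 'for a in assets: if ok(a, kind): return …'
def pickLoopA (kind : String) : List (List (String × String)) → Option (String × String)
  | [] => none
  | a :: rest => if okPred a kind then some (pvExtract a) else pickLoopA kind rest

def pick_asset (release_json : List (String × List (List (String × String)))) : String × String :=
  let assets := ((PySem.Dict.mk release_json).get? "assets").getD []   -- .get("assets") or []
  match pickLoopA "jre" assets with
  | some r => r
  | none =>
    match pickLoopA "jdk" assets with
    | some r => r
    | none => ("", "")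

-- ===== PORT B =====
-- one pass: keep the first jre-matching and first jdk-matching asset
def scanB : List (List (String × String)) → Option (List (String × String)) →
    Option (List (String × String)) →
    Option (List (String × String)) × Option (List (String × String))
  | [], jre, jdk => (jre, jdk)
  | a :: rest, jre, jdk =>
    if okPred a "jre" && jre.isNone then scanB rest (some a) jdk
    else if okPred a "jdk" && jdk.isNone then scanB rest jre (some a)
    else scanB rest jre jdk

def pick_asset_alt (release_json : List (String × List (List (String × String)))) : String × String :=
  let assets := ((PySem.Dict.mk release_json).get? "assets").getD []
  let p := scanB assets none none
  match p.1.orElse (fun _ => p.2) with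
  | some a => pvExtract a
  | none => ("", "")

-- ===== PRECONDITION & SPEC =====
-- the asset both programs select: first jre match, else first jdk match (input shape, not a run of either port)
def pvSelected (release_json : List (String × List (List (String × String)))) :
    Option (List (String × String)) :=
  let assets := ((PySem.Dict.mk release_json).get? "assets").getD []
  (assets.find? (fun a => okPred a "jre")).orElse (fun _ => assets.find? (fun a => okPred a "jdk"))

-- Pre_ excludes exactly the inputs on which A (and B) raise KeyError: those where the
-- selected asset — the first jre-matching asset, else the first jdk-matching one — lacks
-- the key "browser_download_url"; everywhere else A returns normally and is matched.
def Pre_pick_asset (release_json : List (String × List (List (String × String)))) : Prop :=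
  ((pvSelected release_json).all
    (fun a => (PySem.Dict.mk a).contains "browser_download_url")) = true
instance (release_json : List (String × List (List (String × String)))) : Decidable (Pre_pick_asset release_json) := by unfold Pre_pick_asset; infer_instance

def pvWitness_pick_asset : (List (String × List (List (String × String)))) :=
  [("assets", [[("name", "jre-linux-x64.tar.gz"), ("browser_download_url", "u")]])]

def Spec_pick_asset (release_json : List (String × List (List (String × String)))) (out : String × String) : Prop := out = pick_asset_alt release_json
instance (release_json : List (String × List (List (String × String)))) (out : String × String) : Decidable (Spec_pick_asset release_json out) := by unfold Spec_pick_asset; infer_instance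

-- ===== CLAIM (what is proved, stated in full; the proofs are below) =====
def Claim_equal_pick_asset : Prop := ∀ (release_json : List (String × List (List (String × String)))), Dom_pick_asset release_json → Pre_pick_asset release_json → Spec_pick_asset release_json (pick_asset release_json)

-- ===== LEMMAS AND PROOFS =====

theorem pickLoopA_eq_find (kind : String) (l : List (List (String × String))) :
    pickLoopA kind l = (l.find? (fun a => okPred a kind)).map pvExtract := by
  induction l with
  | nil => rfl
  | cons a rest ih =>
    by_cases h : okPred a kind = true
    · simp [pickLoopA, List.find?, h]
    · simp [pickLoopA, List.find?, h, ih]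

theorem scanB_fst (l : List (List (String × String)))
    (jre jdk : Option (List (String × String))) :
    (scanB l jre jdk).1 = jre.orElse (fun _ => l.find? (fun a => okPred a "jre")) := by
  induction l generalizing jre jdk with
  | nil => cases jre <;> rfl
  | cons a rest ih =>
    by_cases h1 : (okPred a "jre" && jre.isNone) = true
    · obtain ⟨hj, hn⟩ := Bool.and_eq_true_iff.mp h1
      cases jre with
      | none => simp [scanB, h1, ih, List.find?, hj, Option.orElse]
      | some x => simp at hn
    · cases jre with
      | some x =>
        by_cases h2 : (okPred a "jdk" && jdk.isNone) = true <;>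
          simp [scanB, h1, h2, ih, Option.orElse]
      | none =>
        have hj : okPred a "jre" = false := by
          cases hje : okPred a "jre" <;> simp [hje] at h1 ⊢
        by_cases h2 : (okPred a "jdk" && jdk.isNone) = true <;>
          simp [scanB, h1, h2, ih, List.find?, hj, Option.orElse]

theorem scanB_snd (l : List (List (String × String)))
    (jdk : Option (List (String × String)))
    (hnone : ∀ a ∈ l, okPred a "jre" = false) :
    (scanB l none jdk).2 = jdk.orElse (fun _ => l.find? (fun a => okPred a "jdk")) := by
  induction l generalizing jdk with
  | nil => cases jdk <;> rfl
  | cons a rest ih =>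
    have hj : okPred a "jre" = false := hnone a (List.mem_cons_self ..)
    have hrest : ∀ b ∈ rest, okPred b "jre" = false := fun b hb => hnone b (List.mem_cons_of_mem _ hb)
    by_cases h2 : (okPred a "jdk" && jdk.isNone) = true
    · obtain ⟨hd, hn⟩ := Bool.and_eq_true_iff.mp h2
      cases jdk with
      | none => simp [scanB, hj, h2, ih _ hrest, List.find?, hd, Option.orElse]
      | some x => simp at hn
    · cases jdk with
      | some x => simp [scanB, hj, h2, ih _ hrest, Option.orElse]
      | none =>
        have hd : okPred a "jdk" = false := by
          cases hde : okPred a "jdk" <;> simp [hde] at h2 ⊢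
        simp [scanB, hj, h2, ih _ hrest, List.find?, hd, Option.orElse]

-- ===== VERDICT (by name: the statement is the Claim_ definition above) =====
theorem pick_asset_spec : Claim_equal_pick_asset := by
  intro rj _ _
  show pick_asset rj = pick_asset_alt rj
  simp only [pick_asset, pick_asset_alt]
  generalize ((PySem.Dict.mk rj).get? "assets").getD [] = assets
  rw [pickLoopA_eq_find, pickLoopA_eq_find, scanB_fst]
  cases hje : assets.find? (fun a => okPred a "jre") with
  | some a => simp [Option.orElse]
  | none =>
    have hall : ∀ a ∈ assets, okPred a "jre" = false := by
      intro a ha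
      have := List.find?_eq_none.mp hje a ha
      simpa using this
    rw [scanB_snd assets none hall]
    cases hd : assets.find? (fun a => okPred a "jdk") <;> simp [Option.orElse]
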